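-- pv_equiv track=rewrite | github.com/pypi-data/pypi-mirror-36 | packages/flake8-spellcheck/flake8-spellcheck-0.4.1.tar.gz/flake8-spellcheck-0.4.1/flake8_spellcheck/__init__.py | parse_camel_case
-- ===== SOURCE A (Python) =====
-- from string import ascii_lowercase, ascii_uppercase, digits
--
-- def parse_camel_case(name, col_offset):
--     index = col_offset
--     buffer = ""
--     for c in name:
--         if c in ascii_uppercase:
--             if buffer:
--                 yield index - len(buffer), buffer
--             buffer = c
--         else:
--             buffer += c
--         index += 1
--
--     if buffer:
--         yield index - len(buffer), buffer
-- ===== SOURCE B (Python) =====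
-- from string import ascii_uppercase
--
-- def parse_camel_case(name, col_offset):
--     bounds = [0] + [i for i, c in enumerate(name) if c in ascii_uppercase] + [len(name)]
--     for start, end in zip(bounds, bounds[1:]):
--         seg = name[start:end]
--         if seg:
--             yield col_offset + start, seg
-- ===== Notes on version B (the rewrite author's own statement) =====
-- stated objective: alternative
-- what changed: Replaced the incremental buffer-flushing loop with a boundary-table pass: collect the word-start indices (0, every uppercase position, len(name)) once, then slice the name between consecutive boundaries, skipping empty slices.
import Mathlib
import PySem

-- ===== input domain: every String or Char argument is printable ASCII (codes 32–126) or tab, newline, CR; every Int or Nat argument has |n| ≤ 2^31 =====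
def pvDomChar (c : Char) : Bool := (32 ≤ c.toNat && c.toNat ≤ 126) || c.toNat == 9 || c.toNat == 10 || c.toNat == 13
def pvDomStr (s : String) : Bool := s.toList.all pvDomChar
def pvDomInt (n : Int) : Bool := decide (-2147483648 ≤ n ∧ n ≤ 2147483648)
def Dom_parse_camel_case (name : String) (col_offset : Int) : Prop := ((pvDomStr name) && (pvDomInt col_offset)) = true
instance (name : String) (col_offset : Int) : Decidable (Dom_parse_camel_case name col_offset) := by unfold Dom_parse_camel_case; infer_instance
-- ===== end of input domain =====

-- B replaces A's incremental buffer-flushing loop by a boundary-table pass: collect the word-start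
-- indices, then slice between consecutive boundaries (objective: alternative decomposition).
-- A is a Python generator; equivalence is about the list of yielded pairs.


-- c in ascii_uppercase  (single character, so a range test)
def pvIsUpper (c : Char) : Bool := decide ('A' ≤ c ∧ c ≤ 'Z')

-- ===== PORT A =====
-- the for-loop: state = (index, buffer, yielded-so-far)
def pvLoopA : List Char → Int → List Char → List (Int × String) → List (Int × String)
  | [], index, buffer, out =>
      if buffer.isEmpty then out else out ++ [(index - buffer.length, String.ofList buffer)]
  | c :: cs, index, buffer, out =>
      if pvIsUpper c then
        pvLoopA cs (index + 1) [c]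
          (if buffer.isEmpty then out else out ++ [(index - buffer.length, String.ofList buffer)])
      else
        pvLoopA cs (index + 1) (buffer ++ [c]) out

def parse_camel_case (name : String) (col_offset : Int) : List (Int × String) :=
  pvLoopA name.toList col_offset [] []

-- ===== PORT B =====
def parse_camel_case_alt (name : String) (col_offset : Int) : List (Int × String) :=
  let cs := name.toList
  let bounds : List Int :=
    0 :: ((PySem.List.enumerate cs 0).filter (fun p => pvIsUpper p.2)).map (fun p => p.1)
      ++ [PySem.List.len cs]
  (bounds.zip bounds.tail).foldl
    (fun acc p =>
      let seg := PySem.List.slice cs (some p.1) (some p.2)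
      if seg.isEmpty then acc else acc ++ [(col_offset + p.1, String.ofList seg)])
    []

-- ===== PRECONDITION & SPEC =====
def Spec_parse_camel_case (name : String) (col_offset : Int) (out : List (Int × String)) : Prop := out = parse_camel_case_alt name col_offset
instance (name : String) (col_offset : Int) (out : List (Int × String)) : Decidable (Spec_parse_camel_case name col_offset out) := by unfold Spec_parse_camel_case; infer_instance

-- ===== CLAIM (what is proved, stated in full; the proofs are below) =====
def Claim_equal_parse_camel_case : Prop := ∀ (name : String) (col_offset : Int), Dom_parse_camel_case name col_offset → Spec_parse_camel_case name col_offset (parse_camel_case name col_offset)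

-- ===== LEMMAS AND PROOFS =====

-- A's loop without the output accumulator
def pvG : List Char → Int → List Char → List (Int × String)
  | [], i, buf => if buf.isEmpty then [] else [(i - buf.length, String.ofList buf)]
  | c :: cs, i, buf =>
      if pvIsUpper c then
        (if buf.isEmpty then [] else [(i - buf.length, String.ofList buf)]) ++ pvG cs (i + 1) [c]
      else
        pvG cs (i + 1) (buf ++ [c])

theorem pvLoopA_out (cs : List Char) : ∀ (i : Int) (buf : List Char) (out : List (Int × String)),
    pvLoopA cs i buf out = out ++ pvG cs i buf := by
  induction cs with
  | nil => intro i buf out; simp only [pvLoopA, pvG]; split <;> simp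
  | cons c cs ih =>
      intro i buf out
      simp only [pvLoopA, pvG]
      split
      · rw [ih]; split <;> simp
      · rw [ih]

-- uppercase positions, recursively
def pvIdxs : List Char → List Int
  | [] => []
  | c :: cs => (if pvIsUpper c then [(0 : Int)] else []) ++ (pvIdxs cs).map (· + 1)

theorem pvIdxs_nonneg (cs : List Char) : ∀ e ∈ pvIdxs cs, 0 ≤ e := by
  induction cs with
  | nil => simp [pvIdxs]
  | cons c cs ih =>
      intro e he
      simp only [pvIdxs, List.mem_append, List.mem_map] at he
      rcases he with he | ⟨x, hx, rfl⟩
      · split at he <;> simp_all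
      · have := ih x hx; omega

theorem pvIdxs_none (cs : List Char) (hc : ∀ c ∈ cs, ¬ pvIsUpper c) : pvIdxs cs = [] := by
  induction cs with
  | nil => simp [pvIdxs]
  | cons c cs ih =>
      simp only [pvIdxs, hc c (by simp), if_neg, Bool.false_eq_true, not_false_iff, List.nil_append]
      simp [ih (fun x hx => hc x (by simp [hx]))]

theorem pvIdxs_append (a b : List Char) :
    pvIdxs (a ++ b) = pvIdxs a ++ (pvIdxs b).map (· + (a.length : Int)) := by
  induction a with
  | nil => simp [pvIdxs]
  | cons c a ih =>
      simp only [List.cons_append, pvIdxs, ih, List.map_append, List.map_map, List.append_assoc,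
        List.length_cons]
      congr 1
      congr 1
      apply List.map_congr_left
      intro x _
      simp only [Function.comp_apply]
      push_cast
      ring

-- B's comprehension computes pvIdxs
theorem pvEnum_filter (cs : List Char) : ∀ s : Int,
    ((PySem.List.enumerate cs s).filter (fun p => pvIsUpper p.2)).map (fun p => p.1)
      = (pvIdxs cs).map (· + s) := by
  induction cs with
  | nil => intro s; simp [PySem.List.enumerate_nil, pvIdxs]
  | cons c cs ih =>
      intro s
      rw [PySem.List.enumerate_cons]
      by_cases h : pvIsUpper c
      · simp only [List.filter_cons, h, ite_true, List.map_cons, pvIdxs, List.map_append,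
          List.map_map, List.singleton_append]
        rw [ih (s + 1)]
        rw [zero_add]
        congr 1
        apply List.map_congr_left
        intro x _
        simp only [Function.comp_apply]
        ring
      · simp only [List.filter_cons, h, Bool.false_eq_true, ite_false, pvIdxs, if_neg,
          not_false_iff, List.nil_append, List.map_map]
        rw [ih (s + 1)]
        apply List.map_congr_left
        intro x _
        simp only [Function.comp_apply]
        ring

-- the boundary-pair emitter
def pvEmit (cs : List Char) (col : Int) : Int → List Int → List (Int × String)
  | _, [] => []
  | s, e :: l =>
      (if (PySem.List.slice cs (some s) (some e)).isEmpty then []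
       else [(col + s, String.ofList (PySem.List.slice cs (some s) (some e)))]) ++ pvEmit cs col e l

theorem pvFold_zip (cs : List Char) (col : Int) (l : List Int) : ∀ (s : Int) (acc : List (Int × String)),
    (((s :: l).zip l).foldl
      (fun acc p =>
        if (PySem.List.slice cs (some p.1) (some p.2)).isEmpty then acc
        else acc ++ [(col + p.1, String.ofList (PySem.List.slice cs (some p.1) (some p.2)))]) acc)
      = acc ++ pvEmit cs col s l := by
  induction l with
  | nil => intro s acc; simp [pvEmit]
  | cons e l ih =>
      intro s acc
      simp only [List.zip_cons_cons, List.foldl_cons, pvEmit, ih]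
      split <;> simp

def pvEmitAll (cs : List Char) (col : Int) : List (Int × String) :=
  pvEmit cs col 0 (pvIdxs cs ++ [(cs.length : Int)])

theorem pvAlt_eq (name : String) (col : Int) :
    parse_camel_case_alt name col = pvEmitAll name.toList col := by
  unfold parse_camel_case_alt pvEmitAll
  simp only [PySem.List.len_eq, List.cons_append, List.tail_cons]
  rw [pvFold_zip]
  have h := pvEnum_filter name.toList 0
  simp only [add_zero] at h
  rw [h]
  simp

-- slices/emission shift across a prefix
theorem pvSlice_shift (ds ys : List Char) (a e : Int) (ha : 0 ≤ a) (he : 0 ≤ e) :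
    PySem.List.slice (ds ++ ys) (some ((ds.length : Int) + a)) (some ((ds.length : Int) + e))
      = PySem.List.slice ys (some a) (some e) := by
  rw [PySem.List.slice_toNat _ (by omega) (by omega), PySem.List.slice_toNat _ ha he]
  have h1 : ((ds.length : Int) + a).toNat = ds.length + a.toNat := by omega
  have h2 : ((ds.length : Int) + e).toNat - ((ds.length : Int) + a).toNat = e.toNat - a.toNat := by omega
  rw [h2, h1]
  congr 1
  rw [List.drop_append]
  simp

theorem pvEmit_shift (ds ys : List Char) (col : Int) (l : List Int) :
    ∀ a : Int, 0 ≤ a → (∀ e ∈ l, 0 ≤ e) →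
    pvEmit (ds ++ ys) col ((ds.length : Int) + a) (l.map (· + (ds.length : Int)))
      = pvEmit ys (col + ds.length) a l := by
  induction l with
  | nil => intro a _ _; simp [pvEmit]
  | cons e l ih =>
      intro a ha hl
      simp only [List.map_cons, pvEmit]
      have he : (0:Int) ≤ e := hl e (by simp)
      have hsl : e + (ds.length : Int) = (ds.length : Int) + e := by ring
      rw [hsl, pvSlice_shift ds ys a e ha he, ih e he (fun x hx => hl x (by simp [hx])),
        show col + ((ds.length : Int) + a) = col + ds.length + a from by ring]

theorem pvEmit_skip_zero (cs : List Char) (col : Int) (l : List Int) :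
    pvEmit cs col 0 (0 :: l) = pvEmit cs col 0 l := by
  simp [pvEmit, PySem.List.slice_toNat cs (le_refl (0:Int)) (le_refl (0:Int))]

-- buffer invariant: every char after the first is not uppercase
def pvTailOk (buf : List Char) : Prop := ∀ c ∈ buf.tail, ¬ pvIsUpper c

-- flushing the buffer = emitting its boundary segments
theorem pvEmit_buf (buf : List Char) (j : Int) (h : pvTailOk buf) :
    pvEmit buf j 0 (pvIdxs buf ++ [(buf.length : Int)])
      = (if buf.isEmpty then [] else [(j, String.ofList buf)]) := by
  match buf with
  | [] =>
      simp [pvIdxs, pvEmit, PySem.List.slice_toNat ([] : List Char) (le_refl (0:Int)) (le_refl (0:Int))]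
  | b :: bt =>
      have hbt : pvIdxs bt = [] := pvIdxs_none bt (fun c hc => h c hc)
      have hslice : PySem.List.slice (b :: bt) (some 0) (some ((b :: bt).length : Int)) = b :: bt := by
        rw [PySem.List.slice_toNat _ (le_refl (0:Int)) (by positivity)]
        simp [List.take_of_length_le]
      have hstep : pvEmit (b :: bt) j 0 [((b :: bt).length : Int)] = [(j, String.ofList (b :: bt))] := by
        simp only [pvEmit, hslice]
        simp
      have hni : pvIdxs (b :: bt) = if pvIsUpper b then [(0:Int)] else [] := by
        rw [pvIdxs, hbt]
        simp
      by_cases hb : pvIsUpper b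
      · rw [hni, if_pos hb, List.singleton_append, pvEmit_skip_zero, hstep]
        simp
      · rw [hni, if_neg hb, List.nil_append, hstep]
        simp

-- main split: an uppercase char closes the buffer
theorem pvEmitAll_split (buf : List Char) (c : Char) (cs : List Char) (j : Int)
    (hup : pvIsUpper c) (h : pvTailOk buf) :
    pvEmitAll (buf ++ c :: cs) j
      = (if buf.isEmpty then [] else [(j, String.ofList buf)]) ++ pvEmitAll (c :: cs) (j + buf.length) := by
  have hT : ∀ e ∈ (pvIdxs cs).map (· + (1:Int)) ++ [((c :: cs).length : Int)], 0 ≤ e := by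
    intro e he
    simp only [List.mem_append, List.mem_map, List.mem_singleton] at he
    rcases he with ⟨x, hx, rfl⟩ | rfl
    · have := pvIdxs_nonneg cs x hx; omega
    · positivity
  have hcons : pvIdxs (c :: cs) = 0 :: (pvIdxs cs).map (· + (1:Int)) := by
    simp [pvIdxs, hup]
  have hidx : pvIdxs (buf ++ c :: cs) ++ [((buf ++ c :: cs).length : Int)]
      = pvIdxs buf ++ ((0 : Int) :: ((pvIdxs cs).map (· + (1:Int)) ++ [((c :: cs).length : Int)])).map (· + (buf.length : Int)) := by
    have htot : ((buf ++ c :: cs).length : Int) = ((c :: cs).length : Int) + (buf.length : Int) := by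
      push_cast [List.length_append]; ring
    rw [htot, pvIdxs_append, hcons]
    simp
  have hshift : pvEmit (buf ++ c :: cs) j (buf.length : Int)
        (((pvIdxs cs).map (· + (1:Int)) ++ [((c :: cs).length : Int)]).map (· + (buf.length : Int)))
      = pvEmitAll (c :: cs) (j + buf.length) := by
    have hs := pvEmit_shift buf (c :: cs) j ((pvIdxs cs).map (· + (1:Int)) ++ [((c :: cs).length : Int)]) 0 le_rfl hT
    rw [add_zero] at hs
    rw [hs]
    unfold pvEmitAll
    rw [hcons, List.cons_append, pvEmit_skip_zero]
  unfold pvEmitAll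
  rw [hidx]
  match buf with
  | [] =>
      simp only [List.nil_append, List.length_nil, Nat.cast_zero, add_zero, List.isEmpty_nil,
        if_true, List.map_cons]
      rw [hcons]
      simp [pvIdxs, List.map_id', Function.comp_def]
  | b :: bt =>
      have hne : (b :: bt).isEmpty = false := rfl
      have hslice : PySem.List.slice ((b :: bt) ++ c :: cs) (some 0) (some ((b :: bt).length : Int))
          = b :: bt := by
        rw [PySem.List.slice_toNat _ le_rfl (by positivity)]
        simp [List.take_left]
      have hbtops : pvIdxs (b :: bt) ++ ((0:Int) + ((b :: bt).length : Int))
            :: ((pvIdxs cs).map (· + (1:Int)) ++ [((c :: cs).length : Int)]).map (· + ((b :: bt).length : Int))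
          = pvIdxs (b :: bt) ++ (((b :: bt).length : Int))
            :: ((pvIdxs cs).map (· + (1:Int)) ++ [((c :: cs).length : Int)]).map (· + ((b :: bt).length : Int)) := by
        rw [zero_add]
      have hstep : pvEmit ((b :: bt) ++ c :: cs) j 0 ((((b :: bt).length : Int))
            :: ((pvIdxs cs).map (· + (1:Int)) ++ [((c :: cs).length : Int)]).map (· + ((b :: bt).length : Int)))
          = (j, String.ofList (b :: bt)) :: pvEmitAll (c :: cs) (j + (b :: bt).length) := by
        simp only [pvEmit, hslice]
        rw [hshift]
        simp
      have hni : pvIdxs (b :: bt) = if pvIsUpper b then [(0:Int)] else [] := by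
        rw [pvIdxs, pvIdxs_none bt (fun x hx => h x hx)]
        simp
      by_cases hb : pvIsUpper b
      · rw [List.map_cons, hbtops, hni, if_pos hb, List.singleton_append, pvEmit_skip_zero, hstep]
        simp [hne, pvEmitAll]
      · rw [List.map_cons, hbtops, hni, if_neg hb, List.nil_append, hstep]
        simp [hne, pvEmitAll]

-- main invariant lemma
theorem pvG_emitAll (cs : List Char) : ∀ (i : Int) (buf : List Char), pvTailOk buf →
    pvG cs i buf = pvEmitAll (buf ++ cs) (i - buf.length) := by
  induction cs with
  | nil =>
      intro i buf h
      simp only [pvG, List.append_nil]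
      rw [pvEmitAll, pvEmit_buf buf _ h]
  | cons c cs ih =>
      intro i buf h
      simp only [pvG]
      by_cases hup : pvIsUpper c
      · simp only [hup, if_pos]
        rw [ih (i + 1) [c] (by intro x hx; simp at hx),
            pvEmitAll_split buf c cs (i - buf.length) hup h]
        simp only [List.singleton_append, List.length_cons, List.length_nil, Nat.cast_add,
          Nat.cast_one, Nat.cast_zero, zero_add]
        congr 2
        omega
      · simp only [hup, Bool.false_eq_true, if_neg, not_false_iff]
        rw [ih (i + 1) (buf ++ [c]) ?_]
        · simp only [List.append_assoc, List.singleton_append, List.length_append,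
            List.length_cons, List.length_nil, Nat.cast_add, Nat.cast_one, Nat.cast_zero, zero_add]
          congr 1
          omega
        · intro x hx
          match buf with
          | [] => simp at hx
          | b :: bt =>
            simp at hx
            rcases hx with hx | rfl
            · exact h x (by simp [hx])
            · exact hup

-- ===== VERDICT (by name: the statement is the Claim_ definition above) =====
theorem parse_camel_case_spec : Claim_equal_parse_camel_case := by
  intro name col _
  unfold Spec_parse_camel_case
  rw [parse_camel_case, pvLoopA_out, pvAlt_eq, List.nil_append,
      pvG_emitAll name.toList col [] (by intro x hx; simp at hx)]
  simp
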